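-- pv_equiv track=rewrite | github.com/CuteSurtr/algebraic_phylogenetics | src/algphylo/invariants_symbolic.py | jc_fourier_support_4taxon
-- ===== SOURCE A (Python) =====
-- from itertools import combinations, product
-- from typing import Dict, List, Sequence, Tuple
--
-- def jc_fourier_support_4taxon(split_A: Tuple[int, ...]) -> List[Tuple[Tuple[int, ...], Tuple[int, ...]]]:
--     kappa = 4
--     n = 4
--     A_set = set(split_A)
--
--     def parity(idx: Tuple[int, ...]) -> Tuple[int, int]:
--         s = (0, 0)
--         for b in idx:
--             s = (s[0] ^ b // 2, s[1] ^ b % 2)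
--         return s
--
--     def signature(idx: Tuple[int, ...]):
--         zero_pattern = tuple((v == 0 for v in idx))
--         sA = (0, 0)
--         for i in A_set:
--             sA = (sA[0] ^ idx[i] // 2, sA[1] ^ idx[i] % 2)
--         internal_zero = sA == (0, 0)
--         return (zero_pattern, internal_zero)
--     from collections import defaultdict
--     groups: Dict[tuple, List[Tuple[int, ...]]] = defaultdict(list)
--     for idx in product(range(kappa), repeat=n):
--         if parity(idx) != (0, 0):
--             continue
--         groups[signature(idx)].append(idx)
--     binomials: List[Tuple[Tuple[int, ...], Tuple[int, ...]]] = []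
--     for grp in groups.values():
--         if len(grp) < 2:
--             continue
--         for i in range(1, len(grp)):
--             binomials.append((grp[0], grp[i]))
--     return binomials
-- ===== SOURCE B (Python) =====
-- from itertools import product
-- from typing import List, Tuple
--
-- def jc_fourier_support_4taxon(split_A: Tuple[int, ...]) -> List[Tuple[Tuple[int, ...], Tuple[int, ...]]]:
--     A_set = set(split_A)
--
--     def signature(idx: Tuple[int, ...]):
--         zero_pattern = tuple(v == 0 for v in idx)
--         sA = (0, 0)
--         for i in A_set:
--             sA = (sA[0] ^ idx[i] // 2, sA[1] ^ idx[i] % 2)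
--         return (zero_pattern, sA == (0, 0))
--
--     # Enumerate the even-parity indices directly: the last coordinate is
--     # determined by the first three, so no filtering over 4**4 tuples.
--     groups = {}
--     for b0, b1, b2 in product(range(4), repeat=3):
--         b3 = 2 * ((b0 // 2) ^ (b1 // 2) ^ (b2 // 2)) + ((b0 % 2) ^ (b1 % 2) ^ (b2 % 2))
--         idx = (b0, b1, b2, b3)
--         groups.setdefault(signature(idx), []).append(idx)
--     return [(g[0], x) for g in groups.values() for x in g[1:]]
-- ===== Notes on version B (the rewrite author's own statement) =====
-- stated objective: alternative
-- what changed: B enumerates the 64 even-parity indices directly by computing the fourth coordinate from the first three (no filtering of all 256 tuples), groups them with setdefault into one dict pass, and emits the binomial pairs with a flat comprehension instead of the guarded nested index loop.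
-- outside the precondition, e.g. on jc_fourier_support_4taxon((4,)): A raises IndexError, B raises IndexError
import Mathlib
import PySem

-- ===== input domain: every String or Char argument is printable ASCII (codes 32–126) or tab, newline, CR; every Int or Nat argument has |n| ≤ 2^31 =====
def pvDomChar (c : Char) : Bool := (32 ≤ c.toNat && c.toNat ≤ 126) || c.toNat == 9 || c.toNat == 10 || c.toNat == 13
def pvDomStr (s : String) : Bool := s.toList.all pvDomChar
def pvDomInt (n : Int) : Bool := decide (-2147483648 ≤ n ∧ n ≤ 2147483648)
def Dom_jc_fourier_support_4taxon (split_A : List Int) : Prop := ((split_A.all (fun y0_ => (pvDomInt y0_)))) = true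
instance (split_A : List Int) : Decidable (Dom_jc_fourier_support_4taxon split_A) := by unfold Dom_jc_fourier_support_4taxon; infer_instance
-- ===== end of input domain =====

-- B enumerates the 64 even-parity Fourier indices directly (the 4th coordinate is
-- determined by the first three) instead of filtering all 256 tuples; same output.

-- ===== PORT A =====
-- s = (s[0] ^ b // 2, s[1] ^ b % 2) folded over the tuple (Python xor/floor-div via PySem)
def pvParity (idx : List Int) : Int × Int :=
  idx.foldl
    (fun s b => (PySem.Int.bxor s.1 (PySem.Int.floordiv b 2), PySem.Int.bxor s.2 (PySem.Int.mod b 2)))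
    (0, 0)

-- signature(idx): XOR over the set A_set is order-independent, so folding the PySem.Set's
-- list is exact; idx[i] is ported as pyGetD idx i 0 — exact when -4 ≤ i < 4 (Pre_),
-- Python raises IndexError otherwise.
def pvSignature (A_set : List Int) (idx : List Int) : List Bool × Bool :=
  let zero_pattern := idx.map (fun v => decide (v = 0))
  let sA := A_set.foldl
    (fun s i => (PySem.Int.bxor s.1 (PySem.Int.floordiv (PySem.List.pyGetD idx i 0) 2),
                 PySem.Int.bxor s.2 (PySem.Int.mod (PySem.List.pyGetD idx i 0) 2)))
    (0, 0)
  (zero_pattern, decide (sA = (0, 0)))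

def jc_fourier_support_4taxon (split_A : List Int) : List (List Int × List Int) :=
  let A_set := PySem.Set.ofList split_A
  let r := PySem.List.pyRange 0 4 1
  -- for idx in product(range(4), repeat=4): if parity(idx) != (0,0): continue; groups[signature(idx)].append(idx)
  let groups :=
    (r.flatMap (fun a => r.flatMap (fun b => r.flatMap (fun c => r.map (fun d => [a, b, c, d]))))).foldl
      (fun g idx => if pvParity idx ≠ (0, 0) then g
                    else g.modify (pvSignature A_set idx) [] (· ++ [idx]))
      PySem.Dict.empty
  -- for grp in groups.values(): if len(grp) < 2: continue; for i in range(1, len(grp)): binomials.append((grp[0], grp[i]))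
  groups.values.foldl
    (fun acc grp =>
      if grp.length < 2 then acc
      else (PySem.List.pyRange 1 grp.length 1).foldl
        (fun acc2 i => acc2 ++ [(PySem.List.pyGetD grp 0 [], PySem.List.pyGetD grp i [])]) acc)
    []

-- ===== PORT B =====
def jc_fourier_support_4taxon_alt (split_A : List Int) : List (List Int × List Int) :=
  let A_set := PySem.Set.ofList split_A
  let r := PySem.List.pyRange 0 4 1
  -- for b0, b1, b2 in product(range(4), repeat=3): b3 determined; groups.setdefault(signature(idx), []).append(idx)
  let groups :=
    (r.flatMap (fun b0 => r.flatMap (fun b1 => r.map (fun b2 => (b0, b1, b2))))).foldl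
      (fun g t =>
        let b3 := 2 * (PySem.Int.bxor (PySem.Int.bxor (PySem.Int.floordiv t.1 2) (PySem.Int.floordiv t.2.1 2)) (PySem.Int.floordiv t.2.2 2))
                  + PySem.Int.bxor (PySem.Int.bxor (PySem.Int.mod t.1 2) (PySem.Int.mod t.2.1 2)) (PySem.Int.mod t.2.2 2)
        let idx := [t.1, t.2.1, t.2.2, b3]
        g.modify (pvSignature A_set idx) [] (· ++ [idx]))
      PySem.Dict.empty
  -- [(g[0], x) for g in groups.values() for x in g[1:]]
  groups.values.flatMap
    (fun g => (PySem.List.slice g (some 1) none).map (fun x => (PySem.List.pyGetD g 0 [], x)))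

-- ===== PRECONDITION & SPEC =====
-- Pre_ excludes inputs holding an index outside [-4, 4): there signature() does idx[i]
-- on a 4-tuple and Python raises IndexError (both A and B raise).
def Pre_jc_fourier_support_4taxon (split_A : List Int) : Prop :=
  ∀ x ∈ split_A, -4 ≤ x ∧ x < 4
instance (split_A : List Int) : Decidable (Pre_jc_fourier_support_4taxon split_A) := by
  unfold Pre_jc_fourier_support_4taxon; infer_instance
def pvWitness_jc_fourier_support_4taxon : List Int := [0, 1]

def Spec_jc_fourier_support_4taxon (split_A : List Int) (out : List (List Int × List Int)) : Prop := out = jc_fourier_support_4taxon_alt split_A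
instance (split_A : List Int) (out : List (List Int × List Int)) : Decidable (Spec_jc_fourier_support_4taxon split_A out) := by unfold Spec_jc_fourier_support_4taxon; infer_instance

-- ===== CLAIM (what is proved, stated in full; the proofs are below) =====
def Claim_equal_jc_fourier_support_4taxon : Prop := ∀ (split_A : List Int), Dom_jc_fourier_support_4taxon split_A → Pre_jc_fourier_support_4taxon split_A → Spec_jc_fourier_support_4taxon split_A (jc_fourier_support_4taxon split_A)

-- ===== LEMMAS AND PROOFS =====

-- the filtered 4-fold product equals B's generated index list (input-independent)
theorem pv_filter_eq_gen :
    (((PySem.List.pyRange 0 4 1).flatMap (fun a => (PySem.List.pyRange 0 4 1).flatMap (fun b => (PySem.List.pyRange 0 4 1).flatMap (fun c => (PySem.List.pyRange 0 4 1).map (fun d => [a, b, c, d]))))).filter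
        (fun idx => decide (pvParity idx = (0, 0))))
    = ((PySem.List.pyRange 0 4 1).flatMap (fun b0 => (PySem.List.pyRange 0 4 1).flatMap (fun b1 => (PySem.List.pyRange 0 4 1).map (fun b2 => (b0, b1, b2))))).map
         (fun t => [t.1, t.2.1, t.2.2,
            2 * (PySem.Int.bxor (PySem.Int.bxor (PySem.Int.floordiv t.1 2) (PySem.Int.floordiv t.2.1 2)) (PySem.Int.floordiv t.2.2 2))
              + PySem.Int.bxor (PySem.Int.bxor (PySem.Int.mod t.1 2) (PySem.Int.mod t.2.1 2)) (PySem.Int.mod t.2.2 2)]) := by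
  decide

theorem pv_range_map_getD {α : Type} (l : List α) (d : α) :
    (PySem.List.pyRange 1 l.length 1).map (fun i => PySem.List.pyGetD l i d) = l.drop 1 := by
  rw [PySem.List.pyRange_one, List.map_map]
  apply List.ext_getElem
  · simp
  · intro i h1 h2
    simp only [List.getElem_map, List.getElem_range, Function.comp_apply]
    have h3 : (1 : Int) + i = ((i + 1 : Nat) : Int) := by push_cast; ring
    rw [h3, PySem.List.pyGetD_natCast]
    simp only [List.length_map, List.length_range, List.length_drop] at h1 h2
    rw [List.getD_eq_getElem _ _ (by omega), List.getElem_drop]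
    congr 1
    omega

theorem pv_emit_eq (acc : List (List Int × List Int)) (grp : List (List Int)) :
    (if grp.length < 2 then acc
     else (PySem.List.pyRange 1 grp.length 1).foldl
       (fun acc2 i => acc2 ++ [(PySem.List.pyGetD grp 0 [], PySem.List.pyGetD grp i [])]) acc)
    = acc ++ (PySem.List.slice grp (some 1) none).map (fun x => (PySem.List.pyGetD grp 0 [], x)) := by
  rw [PySem.List.slice_from_one, ← List.drop_one]
  split_ifs with h
  · match grp, h with
    | [], _ => simp
    | [_], _ => simp
  · rw [PySem.List.foldl_append_singleton_eq_map]
    congr 1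
    rw [← pv_range_map_getD grp ([] : List Int), List.map_map]
    rfl

-- ===== VERDICT (by name: the statement is the Claim_ definition above) =====
theorem jc_fourier_support_4taxon_spec : Claim_equal_jc_fourier_support_4taxon := by
  intro split_A _ _
  unfold Spec_jc_fourier_support_4taxon jc_fourier_support_4taxon jc_fourier_support_4taxon_alt
  simp only [ne_eq, ite_not]
  rw [PySem.List.foldl_ite_eq_foldl_filter
        (p := fun idx => pvParity idx = (0, 0))
        (f := fun g idx => PySem.Dict.modify g (pvSignature (PySem.Set.ofList split_A) idx) [] (· ++ [idx])),
      pv_filter_eq_gen, List.foldl_map]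
  have hfun : (fun (acc : List (List Int × List Int)) (grp : List (List Int)) =>
      if grp.length < 2 then acc
      else (PySem.List.pyRange 1 grp.length 1).foldl
        (fun acc2 i => acc2 ++ [(PySem.List.pyGetD grp 0 [], PySem.List.pyGetD grp i [])]) acc)
    = (fun acc grp => acc ++ (PySem.List.slice grp (some 1) none).map (fun x => (PySem.List.pyGetD grp 0 [], x))) := by
    funext a g; exact pv_emit_eq a g
  rw [hfun, PySem.List.foldl_append_eq_flatMap, List.nil_append]
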